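-- pv_equiv track=rewrite | github.com/KotovNikitaStudent/BLUFR-Python | other_function.py | ind2sub
-- ===== SOURCE A (Python) =====
-- def ind2sub(array_shape, ind):
--     temp = [i[0] for i in enumerate(ind) if i[1] <= 0]
--     for i in temp:
--         for j in range(len(ind)):
--             if j == i:
--                 ind[j] = -1
--     temp1 = [i[0] for i in enumerate(ind) if i[1] >= array_shape[0] * array_shape[1]]
--     for i in temp1:
--         for j in range(len(ind)):
--             if j == i:
--                 ind[j] = -1
--     # rows = [int(i) / array_shape[1] for i in ind]
--     rows = [int(i) // array_shape[0] for i in ind]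
--     cols = [i % array_shape[1] for i in ind]
--     return [rows, cols]
-- ===== SOURCE B (Python) =====
-- def ind2sub(array_shape, ind):
--     n = array_shape[0] * array_shape[1]
--     rows, cols = [], []
--     for x in ind:
--         if x <= 0 or x >= n:
--             x = -1
--         rows.append(x // array_shape[0])
--         cols.append(x % array_shape[1])
--     return [rows, cols]
-- ===== Notes on version B (the rewrite author's own statement) =====
-- stated objective: faster
-- what changed: A masks out-of-range entries with two filter-then-nested-index-matching passes (a full inner scan of ind per masked index, O(n^2)) and then two more comprehensions; B does everything in one linear pass over ind, masking each element and appending its row and column directly (A also mutates ind in place, B does not).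
-- outside the precondition, e.g. on ind2sub([], []): A returns [[], []], B raises IndexError
import Mathlib
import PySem

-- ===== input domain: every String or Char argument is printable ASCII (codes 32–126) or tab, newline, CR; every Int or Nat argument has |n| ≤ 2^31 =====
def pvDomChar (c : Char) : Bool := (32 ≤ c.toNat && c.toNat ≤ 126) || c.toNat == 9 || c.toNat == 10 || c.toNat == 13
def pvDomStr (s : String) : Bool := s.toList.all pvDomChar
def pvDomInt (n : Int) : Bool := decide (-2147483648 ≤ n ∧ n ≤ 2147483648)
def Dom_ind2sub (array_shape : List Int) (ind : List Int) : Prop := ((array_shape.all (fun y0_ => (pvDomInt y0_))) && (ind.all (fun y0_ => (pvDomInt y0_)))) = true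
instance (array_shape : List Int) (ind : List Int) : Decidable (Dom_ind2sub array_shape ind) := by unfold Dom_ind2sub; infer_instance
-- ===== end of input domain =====

-- B replaces A's quadratic index-matching masking passes by one fused linear loop (faster; asymptotic).
-- Side effects: Python A mutates `ind` in place, B does not; the equivalence proved here is about the return value only.

-- ===== PORT A =====
-- inner `for j in range(len(ind)): if j == i: ind[j] = -1`
def ind2subSetLoop (acc : List Int) (i : Int) : List Int :=
  (PySem.List.pyRange 0 (acc.length : Int) 1).foldl
    (fun a j => if j = i then PySem.List.pySetD a j (-1) else a) acc

def ind2sub (array_shape : List Int) (ind : List Int) : List (List Int) :=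
  let temp : List Int := ((PySem.List.enumerate ind).filter (fun i => i.2 ≤ 0)).map (·.1)
  let ind1 : List Int := temp.foldl (fun acc i => ind2subSetLoop acc i) ind
  let temp1 : List Int := ((PySem.List.enumerate ind1).filter
      (fun i => PySem.List.pyGetD array_shape 0 0 * PySem.List.pyGetD array_shape 1 0 ≤ i.2)).map (·.1)
  let ind2 : List Int := temp1.foldl (fun acc i => ind2subSetLoop acc i) ind1
  let rows : List Int := ind2.map (fun i => PySem.Int.floordiv i (PySem.List.pyGetD array_shape 0 0))
  let cols : List Int := ind2.map (fun i => PySem.Int.mod i (PySem.List.pyGetD array_shape 1 0))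
  [rows, cols]

-- ===== PORT B =====
def ind2sub_alt (array_shape : List Int) (ind : List Int) : List (List Int) :=
  let n : Int := PySem.List.pyGetD array_shape 0 0 * PySem.List.pyGetD array_shape 1 0
  let rc : List Int × List Int := ind.foldl
    (fun (p : List Int × List Int) x =>
      let y : Int := if x ≤ 0 ∨ n ≤ x then -1 else x
      (p.1 ++ [PySem.Int.floordiv y (PySem.List.pyGetD array_shape 0 0)],
       p.2 ++ [PySem.Int.mod y (PySem.List.pyGetD array_shape 1 0)]))
    ([], [])
  [rc.1, rc.2]

-- ===== PRECONDITION & SPEC =====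
-- Pre_ excludes the inputs where the Python A raises (array_shape shorter than 2 with nonempty ind:
-- IndexError; a zero among array_shape[0], array_shape[1] with nonempty ind: ZeroDivisionError), and the
-- accidental corner ind = [] with array_shape shorter than 2, where A returns [[], []] only because its
-- comprehensions never evaluate array_shape while B (computing the bound up front) raises IndexError.
def Pre_ind2sub (array_shape : List Int) (ind : List Int) : Prop :=
  2 ≤ array_shape.length ∧ (ind ≠ [] → (array_shape.getD 0 0 ≠ 0 ∧ array_shape.getD 1 0 ≠ 0))
instance (array_shape : List Int) (ind : List Int) : Decidable (Pre_ind2sub array_shape ind) := by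
  unfold Pre_ind2sub; infer_instance

def pvWitness_ind2sub : List Int × List Int := ([3, 4], [0, 5, 20, 7, -2])

def Spec_ind2sub (array_shape : List Int) (ind : List Int) (out : List (List Int)) : Prop := out = ind2sub_alt array_shape ind
instance (array_shape : List Int) (ind : List Int) (out : List (List Int)) : Decidable (Spec_ind2sub array_shape ind out) := by unfold Spec_ind2sub; infer_instance

-- ===== CLAIM (what is proved, stated in full; the proofs are below) =====
def Claim_equal_ind2sub : Prop := ∀ (array_shape : List Int) (ind : List Int), Dom_ind2sub array_shape ind → Pre_ind2sub array_shape ind → Spec_ind2sub array_shape ind (ind2sub array_shape ind)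

-- ===== LEMMAS AND PROOFS =====

-- The inner j-loop sets position i (and nothing else); for 0 ≤ i it is `set i.toNat (-1)`
-- (a no-op when i is out of range, matching List.set's behaviour).
lemma range_set_fold (m : Nat) (acc : List Int) (i : Int) (hi : 0 ≤ i) :
    (List.range m).foldl
      (fun a (k : Nat) => if (k : Int) = i then PySem.List.pySetD a (k : Int) (-1) else a) acc
      = if i < (m : Int) then acc.set i.toNat (-1) else acc := by
  induction m with
  | zero => simp; omega
  | succ m ih =>
    rw [List.range_succ, List.foldl_append, ih]
    by_cases hmi : (m : Int) = i
    · rw [List.foldl_cons, List.foldl_nil, if_pos hmi, if_neg (by omega),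
        if_pos (by push_cast; omega), PySem.List.pySetD_natCast]
      have h3 : i.toNat = m := by omega
      rw [h3]
    · rw [List.foldl_cons, List.foldl_nil, if_neg hmi]
      by_cases h : i < (m : Int)
      · rw [if_pos h, if_pos (by push_cast; omega)]
      · rw [if_neg h, if_neg (by push_cast; omega)]

lemma ind2subSetLoop_eq (acc : List Int) (i : Int) (hi : 0 ≤ i) :
    ind2subSetLoop acc i = acc.set i.toNat (-1) := by
  unfold ind2subSetLoop
  rw [PySem.List.pyRange_zero_natCast, List.foldl_map, range_set_fold _ _ _ hi]
  by_cases h : i < (acc.length : Int)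
  · simp [h]
  · have : acc.length ≤ i.toNat := by omega
    simp [h, List.set_eq_of_length_le this]

-- Folding `set · (-1)` over a list of nonnegative indices, read elementwise.
lemma foldl_set_length (ts : List Int) (l : List Int) :
    (ts.foldl (fun a i => a.set i.toNat (-1)) l).length = l.length := by
  induction ts generalizing l with
  | nil => rfl
  | cons t ts ih => simpa [List.foldl_cons] using ih (l.set t.toNat (-1))

lemma foldl_set_getElem (ts : List Int) (hts : ∀ t ∈ ts, 0 ≤ t) (l : List Int)
    (k : Nat) (hk : k < l.length)
    (hk' : k < (ts.foldl (fun a i => a.set i.toNat (-1)) l).length) :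
    (ts.foldl (fun a i => a.set i.toNat (-1)) l)[k] = if (k : Int) ∈ ts then -1 else l[k] := by
  induction ts generalizing l with
  | nil => simp
  | cons t ts ih =>
    have ht : (0 : Int) ≤ t := hts t (by simp)
    have hts' : ∀ t' ∈ ts, (0 : Int) ≤ t' := fun t' h => hts t' (by simp [h])
    have hk2 : k < (l.set t.toNat (-1)).length := by simpa using hk
    simp only [List.foldl_cons]
    rw [ih hts' (l.set t.toNat (-1)) hk2 (by simpa [List.foldl_cons] using hk')]
    by_cases hmem : (k : Int) ∈ ts
    · simp [hmem]
    · by_cases heq : (k : Int) = t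
      · have ht2 : t.toNat = k := by omega
        simp [heq, ht2]
      · have hne : t.toNat ≠ k := by omega
        simp [hmem, heq, hne]

lemma temp_nonneg (P : Int → Bool) (l : List Int) :
    ∀ t ∈ (((PySem.List.enumerate l).filter (fun p => P p.2)).map (·.1)), (0 : Int) ≤ t := by
  intro t ht
  simp only [List.mem_map, List.mem_filter, PySem.List.mem_enumerate_iff] at ht
  obtain ⟨p, ⟨⟨j, hj, rfl⟩, -⟩, rfl⟩ := ht
  simp

lemma mem_temp_iff (P : Int → Bool) (l : List Int) (k : Nat) (hk : k < l.length) :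
    ((k : Int) ∈ (((PySem.List.enumerate l).filter (fun p => P p.2)).map (·.1))) ↔ P l[k] := by
  simp only [List.mem_map, List.mem_filter, PySem.List.mem_enumerate_iff]
  constructor
  · rintro ⟨p, ⟨⟨j, hj, rfl⟩, hP⟩, h1⟩
    have : j = k := by simpa using h1
    subst this; simpa using hP
  · intro hP
    exact ⟨((k : Int), l[k]), ⟨⟨k, hk, by simp⟩, hP⟩, rfl⟩

-- masking one filter-of-enumerate pass equals a pointwise map
lemma mask_eq (P : Int → Bool) (l : List Int) :
    ((((PySem.List.enumerate l).filter (fun p => P p.2)).map (·.1)).foldl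
        (fun a i => a.set i.toNat (-1)) l)
      = l.map (fun x => if P x then -1 else x) := by
  apply List.ext_getElem
  · simp [foldl_set_length]
  · intro k hk1 hk2
    have hk : k < l.length := by simpa [foldl_set_length] using hk1
    rw [foldl_set_getElem _ (temp_nonneg P l) l k hk hk1, List.getElem_map]
    simp only [mem_temp_iff P l k hk]

lemma foldl_setLoop_eq (ts : List Int) (hts : ∀ t ∈ ts, (0 : Int) ≤ t) (l : List Int) :
    ts.foldl (fun acc i => ind2subSetLoop acc i) l
      = ts.foldl (fun a i => a.set i.toNat (-1)) l := by
  induction ts generalizing l with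
  | nil => rfl
  | cons t ts ih =>
    rw [List.foldl_cons, List.foldl_cons, ind2subSetLoop_eq l t (hts t (by simp)),
      ih (fun t' h => hts t' (by simp [h]))]

-- B's fused fold, with general accumulators.
lemma fused_fold (n a0 a1 : Int) (l : List Int) (r c : List Int) :
    (l.foldl (fun (p : List Int × List Int) x =>
        let y : Int := if x ≤ 0 ∨ n ≤ x then -1 else x
        (p.1 ++ [PySem.Int.floordiv y a0], p.2 ++ [PySem.Int.mod y a1])) (r, c))
      = (r ++ l.map (fun x => PySem.Int.floordiv (if x ≤ 0 ∨ n ≤ x then -1 else x) a0),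
         c ++ l.map (fun x => PySem.Int.mod (if x ≤ 0 ∨ n ≤ x then -1 else x) a1)) := by
  induction l generalizing r c with
  | nil => simp
  | cons x l ih => simp [List.foldl_cons, ih]

-- the two masking passes compose to B's single mask, pointwise
lemma mask_pointwise (n x : Int) :
    (if n ≤ (if x ≤ 0 then (-1 : Int) else x) then (-1 : Int) else (if x ≤ 0 then (-1 : Int) else x))
      = if x ≤ 0 ∨ n ≤ x then -1 else x := by
  split_ifs <;> first | rfl | omega


-- ===== VERDICT (by name: the statement is the Claim_ definition above) =====
theorem ind2sub_spec : Claim_equal_ind2sub := by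
  intro array_shape ind _ _
  simp only [Spec_ind2sub, ind2sub, ind2sub_alt]
  set a0 := PySem.List.pyGetD array_shape 0 0 with ha0
  set a1 := PySem.List.pyGetD array_shape 1 0 with ha1
  rw [foldl_setLoop_eq _ (temp_nonneg (fun x => decide (x ≤ 0)) ind) ind,
      mask_eq (fun x => decide (x ≤ 0)) ind,
      foldl_setLoop_eq _
        (temp_nonneg (fun y => decide (a0 * a1 ≤ y))
          (ind.map (fun x => if decide (x ≤ 0) = true then (-1 : Int) else x))) _,
      mask_eq (fun y => decide (a0 * a1 ≤ y))
        (ind.map (fun x => if decide (x ≤ 0) = true then (-1 : Int) else x)),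
      fused_fold]
  simp only [List.map_map, List.nil_append, decide_eq_true_eq]
  congr 1
  · exact List.map_congr_left fun x _ => by simp only [Function.comp_apply]; rw [mask_pointwise]
  · congr 1
    exact List.map_congr_left fun x _ => by simp only [Function.comp_apply]; rw [mask_pointwise]
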